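-- pv_equiv track=rewrite | github.com/Lightblues/Leetcode | contest/201-250/244.py | minWastedSpace
-- ===== SOURCE A (Python) =====
-- from typing import List, Optional, Tuple
-- from math import sqrt, ceil, floor, log, log2, log10, exp, sin, cos, tan, asin, acos, atan, atan2, hypot, erf, erfc, inf, nan
-- from bisect import bisect_right, bisect_left
-- from itertools import product, permutations, combinations, combinations_with_replacement, accumulate
--
-- def minWastedSpace(packages: List[int], boxes: List[List[int]]) -> int:
--     mod = 10**9 + 7
--     packages.sort()
--     acc = list(accumulate(packages, initial=0))
--     ans = inf
--     for suppliers in boxes: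
--         suppliers.sort()
--         if suppliers[-1] < packages[-1]: continue
--         lastidx = 0; waste = 0
--         for box in suppliers:
--             idx = bisect_right(packages, box)
--             waste += box * (idx - lastidx) - (acc[idx] - acc[lastidx])
--             # 先取 mod 的话可能解答错误
--             # waste %= mod
--             lastidx = idx   # 注意这里的index使用.
--         ans = min(ans, waste)
--     return ans %mod if ans != inf else -1
-- ===== SOURCE B (Python) =====
-- from typing import List
--
--
-- def minWastedSpace(packages: List[int], boxes: List[List[int]]) -> int:
--     MOD = 10 ** 9 + 7
--     packages.sort()
--     total = sum(packages)
--     wastes = []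
--     for supplier in boxes:
--         supplier.sort()
--         if supplier[-1] < packages[-1]:
--             continue
--         k = 0
--         used = 0
--         for p in packages:
--             while supplier[k] < p:
--                 k += 1
--             used += supplier[k]
--         wastes.append(used - total)
--     return min(wastes) % MOD if wastes else -1
-- ===== Notes on version B (the rewrite author's own statement) =====
-- stated objective: alternative
-- what changed: Replaced the prefix-sum (accumulate) table and per-box bisect_right with a per-package merge sweep that assigns each sorted package its smallest fitting box while advancing one pointer into the sorted supplier, and replaced the running min over suppliers by collecting each supplier's waste into a list and taking min once at the end.
import Mathlib
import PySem

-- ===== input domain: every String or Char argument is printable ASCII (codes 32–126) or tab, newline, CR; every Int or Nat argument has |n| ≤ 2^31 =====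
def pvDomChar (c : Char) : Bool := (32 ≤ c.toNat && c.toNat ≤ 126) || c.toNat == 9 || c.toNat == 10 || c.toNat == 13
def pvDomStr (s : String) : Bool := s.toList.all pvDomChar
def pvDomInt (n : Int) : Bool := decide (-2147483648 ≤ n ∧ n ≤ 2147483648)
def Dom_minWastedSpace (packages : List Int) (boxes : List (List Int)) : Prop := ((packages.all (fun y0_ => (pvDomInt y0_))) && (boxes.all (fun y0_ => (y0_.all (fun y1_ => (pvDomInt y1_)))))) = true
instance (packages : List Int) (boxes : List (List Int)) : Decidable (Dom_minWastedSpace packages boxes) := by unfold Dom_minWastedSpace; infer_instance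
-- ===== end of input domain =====

-- B assigns each package directly to its smallest fitting box by one merge sweep over the sorted
-- packages (no prefix-sum table, no per-box bisect) and collects per-supplier wastes in a list,
-- taking min at the end; equivalence is about the RETURN value (both Pythons sort `packages` and
-- each supplier list in place alike).

-- ===== PORT A =====
-- accumulate(packages, initial=0): prefix sums starting with 0
def pvAcc (s : Int) : List Int → List Int
  | [] => [s]
  | x :: xs => s :: pvAcc (s + x) xs

-- inner loop body of A; acc[idx] is in range whenever idx ≤ len ps (bisect_right guarantees it),
-- so List.getD is exact there
def pvStepA (ps acc : List Int) (st : Nat × Int) (box : Int) : Nat × Int :=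
  let idx := PySem.List.bisectRight ps box
  (idx, st.2 + box * ((idx : Int) - (st.1 : Int)) - (acc.getD idx 0 - acc.getD st.1 0))

-- body of A's outer loop over `boxes`
def pvBodyA (ps acc : List Int) (ans : Option Int) (suppliers : List Int) : Option Int :=
  let ss := PySem.List.sorted suppliers (fun x => x) false
  if PySem.List.pyGetD ss (-1) 0 < PySem.List.pyGetD ps (-1) 0 then ans
  else
    let waste := (ss.foldl (pvStepA ps acc) (0, 0)).2
    some (match ans with | none => waste | some a => min a waste)

def minWastedSpace (packages : List Int) (boxes : List (List Int)) : Int :=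
  match boxes.foldl (pvBodyA (PySem.List.sorted packages (fun x => x) false)
      (pvAcc 0 (PySem.List.sorted packages (fun x => x) false))) none with
  | some a => PySem.Int.mod a 1000000007
  | none => -1

-- ===== PORT B =====
-- `while supplier[k] < p: k += 1`
def pvFind (bs : List Int) (p : Int) (k : Nat) : Nat :=
  if h : k < bs.length then
    if bs[k] < p then pvFind bs p (k + 1) else k
  else k
termination_by bs.length - k

-- inner loop body of B over the sorted packages; bs[k] is in range whenever the supplier was not
-- skipped (its max covers every package), so List.getD is exact there
def pvStepB (bs : List Int) (st : Nat × Int) (p : Int) : Nat × Int :=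
  let k := pvFind bs p st.1
  (k, st.2 + bs.getD k 0)

-- body of B's outer loop over `boxes`: append this supplier's waste to the list
def pvBodyB (ps : List Int) (total : Int) (ws : List Int) (supplier : List Int) : List Int :=
  let bs := PySem.List.sorted supplier (fun x => x) false
  if PySem.List.pyGetD bs (-1) 0 < PySem.List.pyGetD ps (-1) 0 then ws
  else ws ++ [(ps.foldl (pvStepB bs) (0, 0)).2 - total]

def minWastedSpace_alt (packages : List Int) (boxes : List (List Int)) : Int :=
  match PySem.List.min?
      (boxes.foldl (pvBodyB (PySem.List.sorted packages (fun x => x) false)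
        ((PySem.List.sorted packages (fun x => x) false).sum)) [])
      (fun y => y) with
  | some m => PySem.Int.mod m 1000000007
  | none => -1

-- ===== PRECONDITION & SPEC =====
-- Pre_ excludes exactly the inputs where A raises IndexError (suppliers[-1] on an empty supplier
-- list, or packages[-1] with empty packages while some supplier exists); B raises there too.
def Pre_minWastedSpace (packages : List Int) (boxes : List (List Int)) : Prop :=
  (boxes ≠ [] → packages ≠ []) ∧ ∀ s ∈ boxes, s ≠ []
instance (packages : List Int) (boxes : List (List Int)) : Decidable (Pre_minWastedSpace packages boxes) := by unfold Pre_minWastedSpace; infer_instance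

def pvWitness_minWastedSpace : List Int × List (List Int) := ([2, 3, 5], [[4, 8], [2, 8], [7]])

def Spec_minWastedSpace (packages : List Int) (boxes : List (List Int)) (out : Int) : Prop := out = minWastedSpace_alt packages boxes
instance (packages : List Int) (boxes : List (List Int)) (out : Int) : Decidable (Spec_minWastedSpace packages boxes out) := by unfold Spec_minWastedSpace; infer_instance

-- ===== CLAIM (what is proved, stated in full; the proofs are below) =====
def Claim_equal_minWastedSpace : Prop := ∀ (packages : List Int) (boxes : List (List Int)), Dom_minWastedSpace packages boxes → Pre_minWastedSpace packages boxes → Spec_minWastedSpace packages boxes (minWastedSpace packages boxes)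

-- ===== LEMMAS AND PROOFS =====

theorem pvWitness_ok :
    Dom_minWastedSpace pvWitness_minWastedSpace.1 pvWitness_minWastedSpace.2 ∧
    Pre_minWastedSpace pvWitness_minWastedSpace.1 pvWitness_minWastedSpace.2 := by
  constructor
  · decide
  · refine ⟨fun _ => by decide, ?_⟩; decide

-- the value of the smallest (first) box ≥ p, and its index
def pvFval : List Int → Int → Int
  | [], _ => 0
  | b :: rest, p => if p ≤ b then b else pvFval rest p

def pvFidx : List Int → Int → Nat
  | [], _ => 0
  | b :: rest, p => if p ≤ b then 0 else pvFidx rest p + 1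

theorem pvFidx_lt_of_mem (bs : List Int) (p b : Int) (hb : b ∈ bs) (hpb : p ≤ b) :
    pvFidx bs p < bs.length := by
  induction bs with
  | nil => cases hb
  | cons x rest ih =>
    by_cases h : p ≤ x
    · simp [pvFidx, h]
    · rcases List.mem_cons.mp hb with rfl | hb'
      · exact absurd hpb h
      · simpa [pvFidx, h] using ih hb'

theorem pvFidx_before (bs : List Int) (p : Int) :
    ∀ i (hi : i < bs.length), i < pvFidx bs p → bs[i] < p := by
  induction bs with
  | nil => intro i hi; simp at hi
  | cons x rest ih =>
    intro i hi hlt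
    by_cases h : p ≤ x
    · simp [pvFidx, h] at hlt
    · cases i with
      | zero => simpa using not_le.mp h
      | succ i =>
        simp only [pvFidx, if_neg h] at hlt
        simpa using ih i (by simp at hi; omega) (by omega)

theorem pvFidx_at (bs : List Int) (p : Int) (h : pvFidx bs p < bs.length) :
    p ≤ bs[pvFidx bs p] := by
  induction bs with
  | nil => simp at h
  | cons x rest ih =>
    by_cases hx : p ≤ x
    · simp [pvFidx, hx]
    · simp only [pvFidx, if_neg hx] at h ⊢
      simpa using ih (by simpa using h)

theorem pvFval_eq_getD (bs : List Int) (p : Int) (h : pvFidx bs p < bs.length) :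
    pvFval bs p = bs.getD (pvFidx bs p) 0 := by
  induction bs with
  | nil => simp at h
  | cons x rest ih =>
    by_cases hx : p ≤ x
    · simp [pvFval, pvFidx, hx]
    · simp only [pvFval, pvFidx, if_neg hx, List.getD_cons_succ]
      exact ih (by simpa [pvFidx, hx] using h)

theorem pvFidx_mono (bs : List Int) (p q : Int) (hpq : p ≤ q) :
    pvFidx bs p ≤ pvFidx bs q := by
  induction bs with
  | nil => simp [pvFidx]
  | cons x rest ih =>
    by_cases hq : q ≤ x
    · simp [pvFidx, hq, le_trans hpq hq]
    · by_cases hp : p ≤ x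
      · simp [pvFidx, hp, hq]
      · simp only [pvFidx, if_neg hp, if_neg hq]; omega

-- the while loop reaches exactly the first box ≥ p when started at or before it
theorem pvFind_eq (bs : List Int) (p : Int) (hlen : pvFidx bs p < bs.length) :
    ∀ k, k ≤ pvFidx bs p → pvFind bs p k = pvFidx bs p := by
  intro k hk
  set f := pvFidx bs p with hf
  have : ∀ m k, f - k ≤ m → k ≤ f → pvFind bs p k = f := by
    intro m
    induction m with
    | zero =>
      intro k hm hkf
      have : k = f := by omega
      subst this
      unfold pvFind
      rw [dif_pos hlen, if_neg (not_lt.mpr (pvFidx_at bs p hlen))]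
    | succ m ih =>
      intro k hm hkf
      rcases eq_or_lt_of_le hkf with rfl | h
      · unfold pvFind
        rw [dif_pos hlen, if_neg (not_lt.mpr (pvFidx_at bs p hlen))]
      · have hklen : k < bs.length := lt_trans h hlen
        unfold pvFind
        rw [dif_pos hklen, if_pos (pvFidx_before bs p k hklen h)]
        exact ih (k + 1) (by omega) (by omega)
  exact this (f - k) k le_rfl hk

-- B's merge sweep sums the smallest fitting box over the packages
theorem innerB (bs : List Int) : ∀ (ps : List Int), ps.Pairwise (· ≤ ·) →
    (∀ p ∈ ps, pvFidx bs p < bs.length) →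
    ∀ (k : Nat) (used : Int), (∀ p ∈ ps, k ≤ pvFidx bs p) →
    (ps.foldl (pvStepB bs) (k, used)).2 = used + (ps.map (pvFval bs)).sum := by
  intro ps
  induction ps with
  | nil => intro _ _ k used _; simp
  | cons p rest ih =>
    intro hsorted hcov k used hk
    have hlen : pvFidx bs p < bs.length := hcov p List.mem_cons_self
    have hfind : pvFind bs p k = pvFidx bs p :=
      pvFind_eq bs p hlen k (hk p List.mem_cons_self)
    have hstep : pvStepB bs (k, used) p = (pvFidx bs p, used + pvFval bs p) := by
      simp [pvStepB, hfind, pvFval_eq_getD bs p hlen]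
    simp only [List.foldl_cons, hstep, List.map_cons, List.sum_cons]
    rw [ih (List.pairwise_cons.mp hsorted).2
        (fun q hq => hcov q (List.mem_cons_of_mem p hq))
        (pvFidx bs p) (used + pvFval bs p)
        (fun q hq => pvFidx_mono bs p q ((List.pairwise_cons.mp hsorted).1 q hq))]
    ring_nf

-- prefix-sum table lookup
theorem pvAcc_getD (ps : List Int) : ∀ (s : Int) (j : Nat), j ≤ ps.length →
    (pvAcc s ps).getD j 0 = s + (ps.take j).sum := by
  induction ps with
  | nil =>
    intro s j hj
    have h0 : j = 0 := Nat.le_zero.mp (by simpa using hj)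
    subst h0; simp [pvAcc]
  | cons x xs ih =>
    intro s j hj
    cases j with
    | zero => simp [pvAcc]
    | succ j =>
      simp only [pvAcc, List.getD_cons_succ, List.take_succ_cons, List.sum_cons]
      rw [ih (s + x) j (by simpa using hj)]; ring

theorem bisectRight_mono (ps : List Int) (hps : ps.Pairwise (· ≤ ·)) (x y : Int) (hxy : x ≤ y) :
    PySem.List.bisectRight ps x ≤ PySem.List.bisectRight ps y := by
  obtain ⟨hlenx, hltx, _⟩ := PySem.List.bisectRight_spec ps x hps
  obtain ⟨hleny, _, hgey⟩ := PySem.List.bisectRight_spec ps y hps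
  by_contra h
  rw [not_le] at h
  have hlt : PySem.List.bisectRight ps y < ps.length := lt_of_lt_of_le h hlenx
  have h1 := hltx _ hlt h
  have h2 := hgey _ hlt le_rfl
  omega

theorem bisectRight_eq_length (ps : List Int) (hps : ps.Pairwise (· ≤ ·)) (x : Int)
    (hall : ∀ a ∈ ps, a ≤ x) : PySem.List.bisectRight ps x = ps.length := by
  obtain ⟨hlen, _, hge⟩ := PySem.List.bisectRight_spec ps x hps
  by_contra h
  have hlt : PySem.List.bisectRight ps x < ps.length := lt_of_le_of_ne hlen h
  exact absurd (hall _ (List.getElem_mem hlt)) (not_le.mpr (hge _ hlt le_rfl))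

-- final pointer of A's inner loop, abstracted
def pvEnd (ps : List Int) : Nat → List Int → Nat
  | j, [] => j
  | _, b :: rest => pvEnd ps (PySem.List.bisectRight ps b) rest

theorem pvEnd_last (ps : List Int) : ∀ (ss : List Int) (h : ss ≠ []) (j : Nat),
    pvEnd ps j ss = PySem.List.bisectRight ps (ss.getLast h) := by
  intro ss
  induction ss with
  | nil => intro h; exact absurd rfl h
  | cons b rest ih =>
    intro _ j
    cases rest with
    | nil => simp [pvEnd]
    | cons c t =>
      rw [List.getLast_cons (by simp)]
      exact ih (by simp) (PySem.List.bisectRight ps b)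

theorem pvEnd_bounds (ps : List Int) (hps : ps.Pairwise (· ≤ ·)) :
    ∀ (ss : List Int), ss.Pairwise (· ≤ ·) → ∀ (j : Nat), j ≤ ps.length →
    (∀ b ∈ ss, j ≤ PySem.List.bisectRight ps b) →
    j ≤ pvEnd ps j ss ∧ pvEnd ps j ss ≤ ps.length := by
  intro ss
  induction ss with
  | nil => intro _ j hj _; exact ⟨le_rfl, hj⟩
  | cons b rest ih =>
    intro hsorted j hj hlo
    have h1 : j ≤ PySem.List.bisectRight ps b := hlo b List.mem_cons_self
    have h2 : PySem.List.bisectRight ps b ≤ ps.length := (PySem.List.bisectRight_spec ps b hps).1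
    have := ih (List.pairwise_cons.mp hsorted).2 (PySem.List.bisectRight ps b) h2
      (fun c hc => bisectRight_mono ps hps b c ((List.pairwise_cons.mp hsorted).1 c hc))
    exact ⟨le_trans h1 this.1, this.2⟩

-- elements of a take/drop window carry their index range
theorem mem_window (ps : List Int) (j e : Nat) (he : e ≤ ps.length) (p : Int)
    (hp : p ∈ (ps.take e).drop j) : ∃ i, j ≤ i ∧ i < e ∧ ∃ hi : i < ps.length, ps[i] = p := by
  rcases List.getElem_of_mem hp with ⟨m, hm, hval⟩
  have hlen : (ps.take e).length = e := by simp [Nat.min_eq_left he]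
  have hm' : j + m < e := by
    have := hm
    rw [List.length_drop, hlen] at this
    omega
  refine ⟨j + m, by omega, hm', by omega, ?_⟩
  rw [List.getElem_drop, List.getElem_take] at hval
  exact hval

theorem sum_map_sub (l : List Int) (g : Int → Int) :
    (l.map (fun p => g p - p)).sum = (l.map g).sum - l.sum := by
  induction l with
  | nil => simp
  | cons x t ih => simp [ih]; ring

theorem sum_map_const_sub (l : List Int) (b : Int) :
    (l.map (fun p => b - p)).sum = (l.length : Int) * b - l.sum := by
  induction l with
  | nil => simp
  | cons x t ih => simp [ih]; ring

-- splitting a window at an intermediate index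
theorem window_split (ps : List Int) (j i e : Nat) (hji : j ≤ i) (hie : i ≤ e)
    (he : e ≤ ps.length) :
    (ps.take i).drop j ++ (ps.take e).drop i = (ps.take e).drop j := by
  have h1 : ps.take i = (ps.take e).take i := by rw [List.take_take, Nat.min_eq_left hie]
  have h2 : (ps.take e).length = e := by simp [Nat.min_eq_left he]
  have h3 : j ≤ ((ps.take e).take i).length := by
    rw [List.length_take, h2, Nat.min_eq_left hie]; exact hji
  rw [h1]
  conv_rhs => rw [← List.take_append_drop i (ps.take e)]
  rw [List.drop_append_of_le_length h3]

-- A's inner loop computes the waste of the window of packages its boxes absorb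
theorem innerA (ps acc : List Int) (hacc : acc = pvAcc 0 ps) (hps : ps.Pairwise (· ≤ ·)) :
    ∀ (ss : List Int), ss.Pairwise (· ≤ ·) →
    ∀ (j : Nat) (w : Int), j ≤ ps.length → (∀ b ∈ ss, j ≤ PySem.List.bisectRight ps b) →
    (ss.foldl (pvStepA ps acc) (j, w)).2 =
      w + (((ps.take (pvEnd ps j ss)).drop j).map (fun p => pvFval ss p - p)).sum := by
  intro ss
  induction ss with
  | nil => intro _ j w hj _; simp [pvEnd]
  | cons b rest ih =>
    intro hsorted j w hj hlo
    obtain ⟨hblen, hblt, hbge⟩ := PySem.List.bisectRight_spec ps b hps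
    set idx := PySem.List.bisectRight ps b with hidx
    have hjidx : j ≤ idx := hlo b List.mem_cons_self
    have hrestlo : ∀ c ∈ rest, idx ≤ PySem.List.bisectRight ps c := fun c hc =>
      bisectRight_mono ps hps b c ((List.pairwise_cons.mp hsorted).1 c hc)
    have hend := pvEnd_bounds ps hps rest (List.pairwise_cons.mp hsorted).2 idx hblen hrestlo
    -- the step's contribution is the waste over the window [j, idx)
    have hseg1 : ∀ p ∈ (ps.take idx).drop j, p ≤ b := by
      intro p hp
      rcases mem_window ps j idx hblen p hp with ⟨i, _, hie, hi, rfl⟩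
      exact hblt i hi hie
    have hlen1 : ((ps.take idx).drop j).length = idx - j := by
      simp [Nat.min_eq_left hblen]
    have hstep : pvStepA ps acc (j, w) b =
        (idx, w + (((ps.take idx).drop j).map (fun p => pvFval (b :: rest) p - p)).sum) := by
      simp only [pvStepA, hacc, ← hidx]
      rw [pvAcc_getD ps 0 idx hblen, pvAcc_getD ps 0 j hj]
      have hmap : ((ps.take idx).drop j).map (fun p => pvFval (b :: rest) p - p)
          = ((ps.take idx).drop j).map (fun p => b - p) :=
        List.map_congr_left (fun p hp => by simp [pvFval, hseg1 p hp])
      have hsum : ((ps.take idx).drop j).sum = (ps.take idx).sum - (ps.take j).sum := by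
        have h1 : ps.take j = (ps.take idx).take j := by
          rw [List.take_take, Nat.min_eq_left hjidx]
        have := List.take_append_drop j (ps.take idx)
        have hs := congrArg List.sum this
        rw [List.sum_append] at hs
        rw [h1]; omega
      rw [hmap, sum_map_const_sub, hlen1, hsum]
      simp only [Prod.mk.injEq]
      constructor
      · trivial
      · push_cast [Nat.cast_sub hjidx]; ring
    simp only [List.foldl_cons, hstep]
    rw [ih (List.pairwise_cons.mp hsorted).2 idx _ hblen hrestlo]
    have hmap2 : ((ps.take (pvEnd ps idx rest)).drop idx).map (fun p => pvFval rest p - p)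
        = ((ps.take (pvEnd ps idx rest)).drop idx).map (fun p => pvFval (b :: rest) p - p) := by
      refine List.map_congr_left (fun p hp => ?_)
      rcases mem_window ps idx (pvEnd ps idx rest) hend.2 p hp with ⟨i, hij, _, hi, rfl⟩
      have hb : b < ps[i] := hbge i hi hij
      simp [pvFval, not_le.mpr hb]
    have hsplit := window_split ps j idx (pvEnd ps idx rest) hjidx hend.1 hend.2
    have : pvEnd ps j (b :: rest) = pvEnd ps idx rest := rfl
    rw [hmap2, this, ← hsplit, List.map_append, List.sum_append]
    ring

theorem le_getLast_of_pairwise (l : List Int) (h : l.Pairwise (· ≤ ·)) (hne : l ≠ []) :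
    ∀ a ∈ l, a ≤ l.getLast hne := by
  intro a ha
  rw [List.getLast_eq_getElem]
  rcases List.getElem_of_mem ha with ⟨i, hi, rfl⟩
  rcases Nat.lt_or_ge i (l.length - 1) with h' | h'
  · exact List.pairwise_iff_getElem.mp h i (l.length - 1) hi (by omega) h'
  · have : i = l.length - 1 := by omega
    subst this; exact le_refl _

-- min of a snoc, as Python's min over the growing waste list
theorem min?_append_singleton (ws : List Int) (w : Int) :
    PySem.List.min? (ws ++ [w]) (fun y => y) =
      some (match PySem.List.min? ws (fun y => y) with | none => w | some a => min a w) := by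
  cases ws with
  | nil => simp [PySem.List.min?]
  | cons x t =>
    rw [List.cons_append, PySem.List.min?_id_cons, PySem.List.min?_id_cons,
      List.foldl_append]
    simp

-- per-supplier wastes agree when the supplier is not skipped
theorem waste_eq (ps : List Int) (hps : ps.Pairwise (· ≤ ·)) (hpne : ps ≠ [])
    (ss : List Int) (hss : ss.Pairwise (· ≤ ·)) (hsne : ss ≠ [])
    (hcover : PySem.List.pyGetD ps (-1) 0 ≤ PySem.List.pyGetD ss (-1) 0) :
    (ss.foldl (pvStepA ps (pvAcc 0 ps)) (0, 0)).2 =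
      (ps.foldl (pvStepB ss) (0, 0)).2 - ps.sum := by
  have hmax : ∀ p ∈ ps, p ≤ ss.getLast hsne := by
    rw [PySem.List.pyGetD_neg_one ss 0 hsne, PySem.List.pyGetD_neg_one ps 0 hpne] at hcover
    intro p hp
    exact le_trans (le_getLast_of_pairwise ps hps hpne p hp) hcover
  have hcov : ∀ p ∈ ps, pvFidx ss p < ss.length := fun p hp =>
    pvFidx_lt_of_mem ss p (ss.getLast hsne) (List.getLast_mem hsne) (hmax p hp)
  have hB := innerB ss ps hps hcov 0 0 (fun _ _ => Nat.zero_le _)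
  have hA := innerA ps (pvAcc 0 ps) rfl hps ss hss 0 0 (Nat.zero_le _) (fun _ _ => Nat.zero_le _)
  have hend : pvEnd ps 0 ss = ps.length := by
    rw [pvEnd_last ps ss hsne 0]
    exact bisectRight_eq_length ps hps _ (fun p hp => hmax p hp)
  rw [hA, hB, hend]
  simp [sum_map_sub]

-- the two outer loops: A's running Option-min is the min of B's waste list
theorem outer_rel (ps : List Int) (hps : ps.Pairwise (· ≤ ·)) (hpne : ps ≠ []) :
    ∀ (bs : List (List Int)), (∀ s ∈ bs, s ≠ []) →
    ∀ (st : Option Int) (ws : List Int), st = PySem.List.min? ws (fun y => y) →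
    bs.foldl (pvBodyA ps (pvAcc 0 ps)) st =
      PySem.List.min? (bs.foldl (pvBodyB ps ps.sum) ws) (fun y => y) := by
  intro bs
  induction bs with
  | nil => intro _ st ws h; simpa using h
  | cons s rest ih =>
    intro hall st ws hst
    simp only [List.foldl_cons]
    have hallrest := fun t ht => hall t (List.mem_cons_of_mem s ht)
    have hsne : PySem.List.sorted s (fun x => x) false ≠ [] := by
      rw [Ne, PySem.List.sorted_eq_nil_iff]
      exact hall s List.mem_cons_self
    have hss : (PySem.List.sorted s (fun x => x) false).Pairwise (· ≤ ·) := by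
      simpa using PySem.List.sorted_pairwise s (fun x => x)
    by_cases hskip : PySem.List.pyGetD (PySem.List.sorted s (fun x => x) false) (-1) 0 <
        PySem.List.pyGetD ps (-1) 0
    · rw [show pvBodyA ps (pvAcc 0 ps) st s = st by simp [pvBodyA, hskip],
        show pvBodyB ps ps.sum ws s = ws by simp [pvBodyB, hskip]]
      exact ih hallrest st ws hst
    · have hw := waste_eq ps hps hpne _ hss hsne (le_of_not_gt hskip)
      have hB : pvBodyB ps ps.sum ws s =
          ws ++ [(ps.foldl (pvStepB (PySem.List.sorted s (fun x => x) false)) (0, 0)).2 - ps.sum] := by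
        simp only [pvBodyB, if_neg hskip]
      cases st with
      | none =>
        have hA : pvBodyA ps (pvAcc 0 ps) none s =
            some ((ps.foldl (pvStepB (PySem.List.sorted s (fun x => x) false)) (0, 0)).2 - ps.sum) := by
          simp only [pvBodyA, if_neg hskip, hw]
        rw [hA, hB]
        refine ih hallrest _ _ ?_
        rw [min?_append_singleton, ← hst]
      | some a =>
        have hA : pvBodyA ps (pvAcc 0 ps) (some a) s =
            some (min a ((ps.foldl (pvStepB (PySem.List.sorted s (fun x => x) false)) (0, 0)).2 - ps.sum)) := by
          simp only [pvBodyA, if_neg hskip, hw]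
        rw [hA, hB]
        refine ih hallrest _ _ ?_
        rw [min?_append_singleton, ← hst]

-- ===== VERDICT (by name: the statement is the Claim_ definition above) =====
theorem minWastedSpace_spec : Claim_equal_minWastedSpace := by
  intro packages boxes _ hpre
  obtain ⟨hne, hall⟩ := hpre
  unfold Spec_minWastedSpace minWastedSpace minWastedSpace_alt
  cases boxes with
  | nil => rfl
  | cons b rest =>
    have hpne0 : packages ≠ [] := hne (by simp)
    have hpne : PySem.List.sorted packages (fun x => x) false ≠ [] := by
      rw [Ne, PySem.List.sorted_eq_nil_iff]; exact hpne0
    have hps : (PySem.List.sorted packages (fun x => x) false).Pairwise (· ≤ ·) := by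
      simpa using PySem.List.sorted_pairwise packages (fun x => x)
    rw [outer_rel _ hps hpne (b :: rest) hall none [] (by simp [PySem.List.min?])]
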